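-- pv_equiv track=rewrite | github.com/angusbezzina/whetstone | scripts/doctor.py | _build_source_details
-- ===== SOURCE A (Python) =====
-- def _build_source_details(sources: list[dict], errors: list[dict]) -> list[dict]:
--     """Build per-source detail list sorted by confidence."""
--     details = []
--
--     for s in sources:
--         source_type = s.get("source_type", "unknown")
--         if source_type in ("llms_txt", "llms_full_txt"):
--             confidence = "high"
--         elif source_type in ("docs_url", "readme"):
--             confidence = "medium"
--         else:
--             confidence = "low"
--         details.append(
--             {
--                 "name": s.get("name", "unknown"),
--                 "source_type": source_type,
--                 "confidence": confidence,
--                 "status": "resolved",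
--             }
--         )
--
--     for e in errors:
--         details.append(
--             {
--                 "name": e.get("name", "unknown"),
--                 "source_type": None,
--                 "confidence": None,
--                 "status": "failed",
--                 "error": e.get("error", "unknown"),
--             }
--         )
--
--     # Sort: resolved high first, then medium, then low, then failed
--     confidence_order = {"high": 0, "medium": 1, "low": 2, None: 3}
--     details.sort(key=lambda d: confidence_order.get(d.get("confidence"), 3))
--
--     return details
-- ===== SOURCE B (Python) =====
-- def _build_source_details(sources: list[dict], errors: list[dict]) -> list[dict]:
--     """Bucket records by confidence rank instead of sorting; concatenation of the
--     four buckets in rank order reproduces the stable sort's order."""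
--     buckets = ([], [], [], [])
--     conf_names = ("high", "medium", "low")
--     for s in sources:
--         st = s.get("source_type", "unknown")
--         if st in ("llms_txt", "llms_full_txt"):
--             rank = 0
--         elif st in ("docs_url", "readme"):
--             rank = 1
--         else:
--             rank = 2
--         buckets[rank].append(
--             {
--                 "name": s.get("name", "unknown"),
--                 "source_type": st,
--                 "confidence": conf_names[rank],
--                 "status": "resolved",
--             }
--         )
--     for e in errors:
--         buckets[3].append(
--             {
--                 "name": e.get("name", "unknown"),
--                 "source_type": None,
--                 "confidence": None,
--                 "status": "failed",
--                 "error": e.get("error", "unknown"),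
--             }
--         )
--     return buckets[0] + buckets[1] + buckets[2] + buckets[3]
-- ===== Notes on version B (the rewrite author's own statement) =====
-- stated objective: alternative
-- what changed: B replaces A's build-everything-then-stable-sort-by-confidence with a single distribution pass that appends each record to one of four rank buckets (high, medium, low, failed) as it is built and returns the buckets concatenated in rank order.
import Mathlib
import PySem

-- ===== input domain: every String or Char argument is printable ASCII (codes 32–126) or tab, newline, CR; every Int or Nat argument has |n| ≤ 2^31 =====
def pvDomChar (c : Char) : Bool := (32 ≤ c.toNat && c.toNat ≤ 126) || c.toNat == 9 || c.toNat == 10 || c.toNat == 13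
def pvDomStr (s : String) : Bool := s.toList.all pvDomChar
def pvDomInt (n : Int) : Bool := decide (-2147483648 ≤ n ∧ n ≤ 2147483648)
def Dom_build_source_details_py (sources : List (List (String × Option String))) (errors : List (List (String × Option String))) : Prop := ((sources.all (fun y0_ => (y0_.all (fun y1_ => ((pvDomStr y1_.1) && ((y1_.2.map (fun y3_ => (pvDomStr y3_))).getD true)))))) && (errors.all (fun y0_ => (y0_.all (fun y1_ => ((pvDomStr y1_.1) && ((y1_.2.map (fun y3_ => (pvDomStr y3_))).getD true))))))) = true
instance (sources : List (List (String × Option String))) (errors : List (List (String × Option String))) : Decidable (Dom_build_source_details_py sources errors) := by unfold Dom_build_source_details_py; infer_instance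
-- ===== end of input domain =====

-- B replaces A's build-then-stable-sort by distributing each record into one of four
-- rank buckets as it is built and concatenating the buckets in rank order.

-- ===== PORT A =====
-- dict.get k on the assoc-list encoding of a Python dict: first match (exact).
def aGet (d : List (String × Option String)) (k : String) : Option (Option String) :=
  match d with
  | [] => none
  | (k', v) :: t => if k' == k then some v else aGet t k

def aSourceDetail (s : List (String × Option String)) : List (String × Option String) :=
  let source_type := (aGet s "source_type").getD (some "unknown")
  let confidence : String :=
    if source_type = some "llms_txt" ∨ source_type = some "llms_full_txt" then "high"
    else if source_type = some "docs_url" ∨ source_type = some "readme" then "medium"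
    else "low"
  [("name", (aGet s "name").getD (some "unknown")),
   ("source_type", source_type),
   ("confidence", some confidence),
   ("status", some "resolved")]

def aErrorDetail (e : List (String × Option String)) : List (String × Option String) :=
  [("name", (aGet e "name").getD (some "unknown")),
   ("source_type", none),
   ("confidence", none),
   ("status", some "failed"),
   ("error", (aGet e "error").getD (some "unknown"))]

def aConfOrder : PySem.Dict (Option String) Int :=
  PySem.Dict.ofList [(some "high", 0), (some "medium", 1), (some "low", 2), (none, 3)]

-- sort key confidence_order.get(d.get("confidence"), 3); Python's d.get flattens a
-- stored None and a missing key alike to None, hence .join (exact: every detail dict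
-- carries a "confidence" entry anyway).
def aKey (d : List (String × Option String)) : Int :=
  aConfOrder.getD ((aGet d "confidence").join) 3

def build_source_details_py (sources : List (List (String × Option String))) (errors : List (List (String × Option String))) : List (List (String × Option String)) :=
  let details := sources.foldl (fun acc s => acc ++ [aSourceDetail s]) []
  let details := errors.foldl (fun acc e => acc ++ [aErrorDetail e]) details
  PySem.List.sorted details aKey false

-- ===== PORT B =====
def bGet (d : List (String × Option String)) (k : String) : Option (Option String) :=
  match d with
  | [] => none
  | (k', v) :: t => if k' == k then some v else bGet t k

def bConfNames : List String := ["high", "medium", "low"]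

-- body of B's source loop: build the record and append it to the bucket of its rank
def bStep (acc : List (List (String × Option String)) × List (List (String × Option String)) × List (List (String × Option String))) (s : List (String × Option String)) : List (List (String × Option String)) × List (List (String × Option String)) × List (List (String × Option String)) :=
  let st := (bGet s "source_type").getD (some "unknown")
  let rank : Nat :=
    if st = some "llms_txt" ∨ st = some "llms_full_txt" then 0
    else if st = some "docs_url" ∨ st = some "readme" then 1
    else 2
  let d := [("name", (bGet s "name").getD (some "unknown")),
            ("source_type", st),
            ("confidence", some (bConfNames.getD rank "")),  -- conf_names[rank], rank < 3
            ("status", some "resolved")]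
  if rank = 0 then (acc.1 ++ [d], acc.2.1, acc.2.2)
  else if rank = 1 then (acc.1, acc.2.1 ++ [d], acc.2.2)
  else (acc.1, acc.2.1, acc.2.2 ++ [d])

def bFailed (e : List (String × Option String)) : List (String × Option String) :=
  [("name", (bGet e "name").getD (some "unknown")),
   ("source_type", none),
   ("confidence", none),
   ("status", some "failed"),
   ("error", (bGet e "error").getD (some "unknown"))]

def build_source_details_py_alt (sources : List (List (String × Option String))) (errors : List (List (String × Option String))) : List (List (String × Option String)) :=
  let bs := sources.foldl bStep ([], [], [])
  let b3 := errors.foldl (fun acc e => acc ++ [bFailed e]) []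
  bs.1 ++ bs.2.1 ++ bs.2.2 ++ b3

-- ===== PRECONDITION & SPEC =====
def Spec_build_source_details_py (sources : List (List (String × Option String))) (errors : List (List (String × Option String))) (out : List (List (String × Option String))) : Prop := out = build_source_details_py_alt sources errors
instance (sources : List (List (String × Option String))) (errors : List (List (String × Option String))) (out : List (List (String × Option String))) : Decidable (Spec_build_source_details_py sources errors out) := by unfold Spec_build_source_details_py; infer_instance

-- ===== CLAIM (what is proved, stated in full; the proofs are below) =====
def Claim_equal_build_source_details_py : Prop := ∀ (sources : List (List (String × Option String))) (errors : List (List (String × Option String))), Dom_build_source_details_py sources errors → Spec_build_source_details_py sources errors (build_source_details_py sources errors)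

-- ===== LEMMAS AND PROOFS =====

theorem bGet_eq_aGet (d : List (String × Option String)) (k : String) : bGet d k = aGet d k := by
  induction d with
  | nil => rfl
  | cons p t ih => simp only [bGet, aGet, ih]

theorem bFailed_eq (e : List (String × Option String)) : bFailed e = aErrorDetail e := by
  simp only [bFailed, aErrorDetail, bGet_eq_aGet]

-- proof-side mirror of the confidence classification shared by both programs
def rnk (s : List (String × Option String)) : Nat :=
  let st := (aGet s "source_type").getD (some "unknown")
  if st = some "llms_txt" ∨ st = some "llms_full_txt" then 0
  else if st = some "docs_url" ∨ st = some "readme" then 1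
  else 2

theorem rnk_le (s : List (String × Option String)) : rnk s ≤ 2 := by
  unfold rnk; dsimp only; split_ifs <;> omega

theorem aKey_source (s : List (String × Option String)) : aKey (aSourceDetail s) = (rnk s : Int) := by
  unfold aKey aSourceDetail rnk
  dsimp only
  split_ifs <;> rfl

theorem aKey_error (e : List (String × Option String)) : aKey (aErrorDetail e) = 3 := rfl

theorem bStep_eq (acc : List (List (String × Option String)) × List (List (String × Option String)) × List (List (String × Option String))) (s : List (String × Option String)) :
    bStep acc s =
      if rnk s = 0 then (acc.1 ++ [aSourceDetail s], acc.2.1, acc.2.2)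
      else if rnk s = 1 then (acc.1, acc.2.1 ++ [aSourceDetail s], acc.2.2)
      else (acc.1, acc.2.1, acc.2.2 ++ [aSourceDetail s]) := by
  unfold bStep rnk aSourceDetail
  dsimp only
  simp only [bGet_eq_aGet]
  split_ifs <;> rfl

theorem bfold (l : List (List (String × Option String))) (a0 a1 a2 : List (List (String × Option String))) :
    l.foldl bStep (a0, a1, a2) =
      (a0 ++ (l.filter (fun s => rnk s == 0)).map aSourceDetail,
       a1 ++ (l.filter (fun s => rnk s == 1)).map aSourceDetail,
       a2 ++ (l.filter (fun s => rnk s == 2)).map aSourceDetail) := by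
  induction l generalizing a0 a1 a2 with
  | nil => simp
  | cons s t ih =>
    have h2 := rnk_le s
    rw [List.foldl_cons, bStep_eq]
    by_cases h0 : rnk s = 0
    · simp [h0, ih]
    · by_cases h1 : rnk s = 1
      · simp [h1, ih]
      · have : rnk s = 2 := by omega
        simp [this, ih]

theorem foldl_app {α β : Type} (f : α → β) (l : List α) (init : List β) :
    l.foldl (fun acc x => acc ++ [f x]) init = init ++ l.map f := by
  induction l generalizing init with
  | nil => simp
  | cons x t ih => simp [List.foldl_cons, ih]

theorem insertBy_middle {α : Type} (before : α → α → Bool) (x : α) :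
    ∀ (as bs : List α), (∀ a ∈ as, before x a = false) → (∀ b ∈ bs, before x b = true) →
      PySem.List.insertBy before x (as ++ bs) = as ++ x :: bs := by
  intro as
  induction as with
  | nil =>
    intro bs _ hb
    cases bs with
    | nil => rfl
    | cons b t => simp [PySem.List.insertBy, hb b (by simp)]
  | cons a t ih =>
    intro bs ha hb
    have h0 : before x a = false := ha a (by simp)
    simp only [List.cons_append, PySem.List.insertBy, h0]
    simp [ih bs (fun y hy => ha y (by simp [hy])) hb]

-- a stable sort whose keys all lie in {0,1,2,3} is the concatenation of the four filters
theorem stable4 {α : Type} (key : α → Int) (xs : List α)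
    (h : ∀ x ∈ xs, 0 ≤ key x ∧ key x ≤ 3) :
    PySem.List.sorted xs key false =
      xs.filter (fun x => key x == 0) ++ xs.filter (fun x => key x == 1) ++
      xs.filter (fun x => key x == 2) ++ xs.filter (fun x => key x == 3) := by
  rw [PySem.List.sorted_eq_foldl_insertBy]
  induction xs using List.reverseRecOn with
  | nil => rfl
  | append_singleton l x ih =>
    have hl : ∀ y ∈ l, 0 ≤ key y ∧ key y ≤ 3 := fun y hy => h y (by simp [hy])
    have hx : 0 ≤ key x ∧ key x ≤ 3 := h x (by simp)
    rw [List.foldl_append, List.foldl_cons, List.foldl_nil, ih hl]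
    have key_of : ∀ (j : Int) (a : α), a ∈ l.filter (fun y => key y == j) → key a = j := by
      intro j a ha
      simpa using (List.of_mem_filter ha)
    simp only [List.filter_append]
    have hk : key x = 0 ∨ key x = 1 ∨ key x = 2 ∨ key x = 3 := by omega
    rcases hk with hk | hk | hk | hk
    · rw [show l.filter (fun y => key y == 0) ++ l.filter (fun y => key y == 1) ++
            l.filter (fun y => key y == 2) ++ l.filter (fun y => key y == 3)
          = l.filter (fun y => key y == 0) ++ (l.filter (fun y => key y == 1) ++
            l.filter (fun y => key y == 2) ++ l.filter (fun y => key y == 3)) by simp]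
      rw [insertBy_middle _ x _ _
        (by intro a ha; have := key_of 0 a ha; simp [this, hk])
        (by intro b hb; simp only [List.mem_append] at hb
            rcases hb with (hb | hb) | hb
            · have := key_of 1 b hb; simp [this, hk]
            · have := key_of 2 b hb; simp [this, hk]
            · have := key_of 3 b hb; simp [this, hk])]
      simp [hk]
    · rw [show l.filter (fun y => key y == 0) ++ l.filter (fun y => key y == 1) ++
            l.filter (fun y => key y == 2) ++ l.filter (fun y => key y == 3)
          = (l.filter (fun y => key y == 0) ++ l.filter (fun y => key y == 1)) ++
            (l.filter (fun y => key y == 2) ++ l.filter (fun y => key y == 3)) by simp]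
      rw [insertBy_middle _ x _ _
        (by intro a ha; simp only [List.mem_append] at ha
            rcases ha with ha | ha
            · have := key_of 0 a ha; simp [this, hk]
            · have := key_of 1 a ha; simp [this, hk])
        (by intro b hb; simp only [List.mem_append] at hb
            rcases hb with hb | hb
            · have := key_of 2 b hb; simp [this, hk]
            · have := key_of 3 b hb; simp [this, hk])]
      simp [hk]
    · rw [show l.filter (fun y => key y == 0) ++ l.filter (fun y => key y == 1) ++
            l.filter (fun y => key y == 2) ++ l.filter (fun y => key y == 3)
          = (l.filter (fun y => key y == 0) ++ l.filter (fun y => key y == 1) ++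
            l.filter (fun y => key y == 2)) ++ l.filter (fun y => key y == 3) by simp]
      rw [insertBy_middle _ x _ _
        (by intro a ha; simp only [List.mem_append] at ha
            rcases ha with (ha | ha) | ha
            · have := key_of 0 a ha; simp [this, hk]
            · have := key_of 1 a ha; simp [this, hk]
            · have := key_of 2 a ha; simp [this, hk])
        (by intro b hb; have := key_of 3 b hb; simp [this, hk])]
      simp [hk]
    · rw [show l.filter (fun y => key y == 0) ++ l.filter (fun y => key y == 1) ++
            l.filter (fun y => key y == 2) ++ l.filter (fun y => key y == 3)
          = (l.filter (fun y => key y == 0) ++ l.filter (fun y => key y == 1) ++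
            l.filter (fun y => key y == 2) ++ l.filter (fun y => key y == 3)) ++ [] by simp]
      rw [insertBy_middle _ x _ []
        (by intro a ha; simp only [List.mem_append] at ha
            rcases ha with (((ha | ha) | ha) | ha)
            · have := key_of 0 a ha; simp [this, hk]
            · have := key_of 1 a ha; simp [this, hk]
            · have := key_of 2 a ha; simp [this, hk]
            · have := key_of 3 a ha; simp [this, hk])
        (by intro b hb; simp at hb)]
      simp [hk]

-- ===== VERDICT (by name: the statement is the Claim_ definition above) =====
theorem build_source_details_py_spec : Claim_equal_build_source_details_py := by
  intro sources errors _
  unfold Spec_build_source_details_py build_source_details_py build_source_details_py_alt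
  dsimp only
  rw [foldl_app, foldl_app, foldl_app, bfold]
  simp only [List.nil_append]
  rw [stable4 aKey (sources.map aSourceDetail ++ errors.map aErrorDetail)
      (by intro d hd; simp only [List.mem_append, List.mem_map] at hd
          rcases hd with ⟨s, _, rfl⟩ | ⟨e, _, rfl⟩
          · rw [aKey_source]; have := rnk_le s; omega
          · rw [aKey_error]; omega)]
  simp only [List.filter_append, List.filter_map]
  have hS : ∀ (j : Nat), (sources.filter (fun s => aKey (aSourceDetail s) == (j : Int))).map aSourceDetail
      = (sources.filter (fun s => rnk s == j)).map aSourceDetail := by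
    intro j
    congr 1
    apply List.filter_congr
    intro s _
    rw [aKey_source]
    simp
  have hS3 : sources.filter (fun s => aKey (aSourceDetail s) == (3 : Int)) = [] := by
    apply List.filter_eq_nil_iff.mpr
    intro s _
    rw [aKey_source]
    have := rnk_le s
    simp; omega
  have hE : ∀ (j : Int), j ≠ 3 → errors.filter (fun e => aKey (aErrorDetail e) == j) = [] := by
    intro j hj
    apply List.filter_eq_nil_iff.mpr
    intro e _
    rw [aKey_error]
    simp; omega
  have hE3 : errors.filter (fun e => aKey (aErrorDetail e) == (3 : Int)) = errors := by
    apply List.filter_eq_self.mpr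
    intro e _
    simp [aKey_error]
  simp only [Function.comp_def]
  rw [hS3, hE3, hE 0 (by omega), hE 1 (by omega), hE 2 (by omega)]
  have h0 := hS 0; have h1 := hS 1; have h2 := hS 2
  simp only [Nat.cast_zero, Nat.cast_one, Nat.cast_ofNat] at h0 h1 h2
  rw [h0, h1, h2]
  have hbf : bFailed = aErrorDetail := funext bFailed_eq
  simp [hbf]
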